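-- pv_equiv track=rewrite | github.com/jmasclef/asr_framework | src/asr_dictionary.py | asr_trackRuleTarget
-- ===== SOURCE A (Python) =====
-- def asr_trackRuleTarget(dict,word):
--     #fonction récurrente qui retourne c si a->b->c
--     if word not in dict.keys():
--         return word
--     else:
--         if dict[word] in dict.keys():
--             return asr_trackRuleTarget(dict,dict[word])
--         else:
--             return dict[word]
-- ===== SOURCE B (Python) =====
-- def asr_trackRuleTarget(dict, word):
--     # Bounded fixpoint iteration: the resolution step word -> dict.get(word, word)
--     # is the identity once word is not a key, and along an acyclic chain each key
--     # is visited at most once, so len(dict) + 1 steps reach the terminal word.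
--     # (On cyclic dicts, where A recurses forever, this terminates instead.)
--     for _ in range(len(dict) + 1):
--         word = dict.get(word, word)
--     return word
-- ===== Notes on version B (the rewrite author's own statement) =====
-- stated objective: alternative
-- what changed: A's conditional recursion with a look-ahead key test is replaced by a bounded fixpoint iteration: apply the step word -> dict.get(word, word) exactly len(dict)+1 times (the step is the identity once word leaves the key set, and an acyclic chain has at most len(dict) keys).
import Mathlib
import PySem

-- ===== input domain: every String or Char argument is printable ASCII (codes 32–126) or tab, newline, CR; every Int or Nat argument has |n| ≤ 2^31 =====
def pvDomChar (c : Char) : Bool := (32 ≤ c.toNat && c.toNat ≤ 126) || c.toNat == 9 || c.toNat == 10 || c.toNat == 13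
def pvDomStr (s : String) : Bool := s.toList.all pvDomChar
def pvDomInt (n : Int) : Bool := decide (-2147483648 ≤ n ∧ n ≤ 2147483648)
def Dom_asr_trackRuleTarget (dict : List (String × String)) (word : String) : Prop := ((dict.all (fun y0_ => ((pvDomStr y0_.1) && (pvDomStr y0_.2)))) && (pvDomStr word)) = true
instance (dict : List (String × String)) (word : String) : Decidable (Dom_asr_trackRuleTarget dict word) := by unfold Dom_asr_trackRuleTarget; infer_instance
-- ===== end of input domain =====

-- B replaces A's conditional recursion by a bounded fixpoint iteration (len(dict)+1 applications of
-- word -> dict.get(word, word)); equal cost on chains, and it terminates on cyclic dicts, which Pre_ excludes.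


-- ===== PORT A =====
-- 'word in dict.keys()': key membership, first-match association-list semantics
def pvIsKey (dict : List (String × String)) (w : String) : Bool :=
  (dict.map Prod.fst).contains w
-- 'dict[word]' — only evaluated after the key test succeeds, so the default is never the result
def pvLookup (dict : List (String × String)) (w : String) : String :=
  (PySem.Dict.mk dict).getD w w
-- A's recursion, with a fuel guard to make it total (under Pre_ the chain exits within dict.length
-- steps, so fuel dict.length+1 is never exhausted); branches follow A's code in order.
def asr_trackRuleTargetFuel : Nat → List (String × String) → String → String
  | 0, _, word => word
  | fuel+1, dict, word =>
    if pvIsKey dict word = false then word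
    else
      if pvIsKey dict (pvLookup dict word) then asr_trackRuleTargetFuel fuel dict (pvLookup dict word)
      else pvLookup dict word
def asr_trackRuleTarget (dict : List (String × String)) (word : String) : String :=
  asr_trackRuleTargetFuel (dict.length + 1) dict word

-- ===== PORT B =====
-- B's for-loop: len(dict)+1 unconditional applications of word = dict.get(word, word), as a fold.
def asr_trackRuleTarget_alt (dict : List (String × String)) (word : String) : String :=
  (List.range (dict.length + 1)).foldl
    (fun w _ => (PySem.Dict.mk dict).getD w w) word

-- ===== PRECONDITION & SPEC =====
-- Pre_ excludes exactly the cyclic chains, on which Python A recurses forever (no value is returned):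
-- the chain from word must leave the key set within dict.length steps (an acyclic chain of distinct
-- keys cannot be longer than the number of keys).
def Pre_asr_trackRuleTarget (dict : List (String × String)) (word : String) : Prop :=
  ∃ n ≤ dict.length, pvIsKey dict ((fun w => pvLookup dict w)^[n] word) = false
instance (dict : List (String × String)) (word : String) : Decidable (Pre_asr_trackRuleTarget dict word) := by unfold Pre_asr_trackRuleTarget; infer_instance
def pvWitness_asr_trackRuleTarget : (List (String × String)) × String := ([("a", "b")], "a")
def Spec_asr_trackRuleTarget (dict : List (String × String)) (word : String) (out : String) : Prop := out = asr_trackRuleTarget_alt dict word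
instance (dict : List (String × String)) (word : String) (out : String) : Decidable (Spec_asr_trackRuleTarget dict word out) := by unfold Spec_asr_trackRuleTarget; infer_instance

-- ===== CLAIM (what is proved, stated in full; the proofs are below) =====
def Claim_equal_asr_trackRuleTarget : Prop := ∀ (dict : List (String × String)) (word : String), Dom_asr_trackRuleTarget dict word → Pre_asr_trackRuleTarget dict word → Spec_asr_trackRuleTarget dict word (asr_trackRuleTarget dict word)

-- ===== LEMMAS AND PROOFS =====
-- B's step fixes every non-key: dict.get(w, w) = w when w is not a key.
theorem step_fixed (dict : List (String × String)) (w : String)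
    (h : pvIsKey dict w = false) : pvLookup dict w = w := by
  induction dict with
  | nil => rfl
  | cons p rest ih =>
    obtain ⟨k, v⟩ := p
    simp only [pvIsKey, List.map_cons, List.contains_cons, Bool.or_eq_false_iff, beq_eq_false_iff_ne] at h
    simp only [pvLookup, PySem.Dict.getD_eq_get?_getD, PySem.Dict.get?_mk_cons] at ih ⊢
    have hk : (k == w) = false := by simpa [beq_eq_false_iff_ne] using fun e => h.1 e.symm
    simpa [hk] using ih (by simpa [pvIsKey, List.contains_eq_any_beq] using h.2)

-- the fold of B's step over range n is the n-fold iterate of the step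
theorem foldl_range_iterate {α : Type} (f : α → α) (n : Nat) (x : α) :
    (List.range n).foldl (fun w _ => f w) x = f^[n] x := by
  induction n generalizing x with
  | zero => rfl
  | succ m ih => rw [List.range_succ_eq_map]; simp [List.foldl_map, ih, Function.iterate_succ_apply]

-- A's fueled recursion equals the fuel-fold iterate of B's step (the step fixes non-keys, so the
-- early exits of A coincide with the iterate becoming stationary).
theorem fuel_eq_iterate (fuel : Nat) (dict : List (String × String)) (word : String) :
    asr_trackRuleTargetFuel fuel dict word = (fun w => pvLookup dict w)^[fuel] word := by
  induction fuel generalizing word with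
  | zero => rfl
  | succ n ih =>
    by_cases h : pvIsKey dict word
    · simp only [asr_trackRuleTargetFuel, h, Bool.true_eq_false, if_false,
        Function.iterate_succ_apply]
      by_cases hv : pvIsKey dict (pvLookup dict word)
      · simp [hv, ih]
      · simp only [Bool.not_eq_true] at hv
        simp [hv, Function.iterate_fixed (step_fixed dict _ hv)]
    · simp only [Bool.not_eq_true] at h
      simp [asr_trackRuleTargetFuel, h, Function.iterate_fixed (step_fixed dict _ h)]

-- ===== VERDICT (by name: the statement is the Claim_ definition above) =====
theorem asr_trackRuleTarget_spec : Claim_equal_asr_trackRuleTarget := by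
  intro dict word _ _
  unfold Spec_asr_trackRuleTarget asr_trackRuleTarget asr_trackRuleTarget_alt
  rw [foldl_range_iterate, fuel_eq_iterate]
  simp only [pvLookup]
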